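-- pv_equiv track=rewrite | github.com/seanchen513/dcp | dcp75 - longest inc subseq.py | construct_LIS_table
-- ===== SOURCE A (Python) =====
-- def construct_LIS_table(a):
--     n = len(a)
--     L = [[] for x in range(n)]
--     L[0] = [a[0]]
--
--     for i in range(1, n):
--         # define L[i] = sequence concatenation of max{ L(j): j < i } and a[i]
--         for j in range(0, i):
--             if ( a[j] < a[i] ) and ( len(L[j]) > len(L[i]) ):
--                 L[i] = L[j].copy() # !!!
--
--         L[i].append(a[i])
--
--     # L[i] now stores increasing subsequence of "a" that ends with a[i]
--     return L
-- ===== SOURCE B (Python) =====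
-- # B: DP storing length and earliest best predecessor per index, then one
-- # pointer-chase reconstruction per index -- O(n^2) instead of A's O(n^3)
-- # repeated list copying. Returns [] on the empty list (A raises there).
-- def construct_LIS_table(a):
--     n = len(a)
--     lengths = [1] * n
--     pred = [-1] * n
--     for i in range(1, n):
--         for j in range(0, i):
--             if a[j] < a[i] and lengths[j] + 1 > lengths[i]:
--                 lengths[i] = lengths[j] + 1
--                 pred[i] = j
--     result = []
--     for i in range(0, n):
--         seq = []
--         k = i
--         while k != -1:
--             seq.append(a[k])
--             k = pred[k]
--         seq.reverse()
--         result.append(seq)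
--     return result
-- ===== Notes on version B (the rewrite author's own statement) =====
-- stated objective: faster
-- what changed: B replaces A's O(n^3) table that repeatedly copies whole best-so-far subsequences with an O(n^2) DP over (length, earliest-best-predecessor) pairs, reconstructing each subsequence once by following predecessor pointers.
-- outside the precondition, e.g. on construct_LIS_table([]): A raises IndexError, B returns []
import Mathlib
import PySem

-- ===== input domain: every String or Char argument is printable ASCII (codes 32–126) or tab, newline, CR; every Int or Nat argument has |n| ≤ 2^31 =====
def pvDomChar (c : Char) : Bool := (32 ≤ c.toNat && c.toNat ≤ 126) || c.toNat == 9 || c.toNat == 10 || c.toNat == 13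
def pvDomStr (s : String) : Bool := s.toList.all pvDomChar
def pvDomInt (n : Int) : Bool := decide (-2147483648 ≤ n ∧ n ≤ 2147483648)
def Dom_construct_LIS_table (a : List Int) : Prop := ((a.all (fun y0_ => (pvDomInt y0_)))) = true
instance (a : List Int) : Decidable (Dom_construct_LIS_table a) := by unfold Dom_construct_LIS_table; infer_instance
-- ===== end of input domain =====

-- B replaces A's O(n^3) repeated-copy table by an O(n^2) DP over (length, predecessor)
-- pairs with one pointer-chase reconstruction per index.

-- ===== PORT A =====
def construct_LIS_table (a : List Int) : List (List Int) :=
  let n : Nat := a.length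
  let L : List (List Int) := (PySem.List.pyRange 0 (n : Int) 1).map (fun _ => ([] : List Int))
  let L := PySem.List.pySetD L 0 [PySem.List.pyGetD a 0 0]
  (PySem.List.pyRange 1 (n : Int) 1).foldl (fun L i =>
    let L := (PySem.List.pyRange 0 i 1).foldl (fun L j =>
      if PySem.List.pyGetD a j 0 < PySem.List.pyGetD a i 0 ∧
         PySem.List.len (PySem.List.pyGetD L j ([] : List Int)) >
           PySem.List.len (PySem.List.pyGetD L i ([] : List Int))
      then PySem.List.pySetD L i (PySem.List.pyGetD L j ([] : List Int))
      else L) L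
    PySem.List.pySetD L i (PySem.List.pyGetD L i ([] : List Int) ++ [PySem.List.pyGetD a i 0])) L

-- ===== PORT B =====
-- port of Source B's 'while k != -1' pointer chase; the fuel argument is only a
-- totality guard (pred chains strictly decrease, so a.length + 1 steps suffice)
def reconGo (a pred : List Int) : Nat → Int → List Int → List Int
  | 0, _, seq => seq
  | fuel + 1, k, seq =>
    if k = -1 then seq
    else reconGo a pred fuel (PySem.List.pyGetD pred k 0) (seq ++ [PySem.List.pyGetD a k 0])

def construct_LIS_table_alt (a : List Int) : List (List Int) :=
  let n : Nat := a.length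
  let st : List Int × List Int := (List.replicate n (1 : Int), List.replicate n (-1 : Int))
  let st := (PySem.List.pyRange 1 (n : Int) 1).foldl (fun st i =>
    (PySem.List.pyRange 0 i 1).foldl (fun (st : List Int × List Int) j =>
      if PySem.List.pyGetD a j 0 < PySem.List.pyGetD a i 0 ∧
         PySem.List.pyGetD st.1 j 0 + 1 > PySem.List.pyGetD st.1 i 0
      then (PySem.List.pySetD st.1 i (PySem.List.pyGetD st.1 j 0 + 1),
            PySem.List.pySetD st.2 i j)
      else st) st) st
  (PySem.List.pyRange 0 (n : Int) 1).foldl (fun res i =>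
    res ++ [(reconGo a st.2 (n + 1) i []).reverse]) []

-- ===== PRECONDITION & SPEC =====
-- Pre_ excludes exactly the empty list, on which the Python A raises IndexError
-- (it assigns L[0] = [a[0]] unconditionally); B returns [] there.
def Pre_construct_LIS_table (a : List Int) : Prop := a ≠ []
instance (a : List Int) : Decidable (Pre_construct_LIS_table a) := by
  unfold Pre_construct_LIS_table; infer_instance
def pvWitness_construct_LIS_table : List Int := [3, 1, 2]

def Spec_construct_LIS_table (a : List Int) (out : List (List Int)) : Prop :=
  out = construct_LIS_table_alt a
instance (a : List Int) (out : List (List Int)) : Decidable (Spec_construct_LIS_table a out) := by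
  unfold Spec_construct_LIS_table; infer_instance

-- ===== CLAIM (what is proved, stated in full; the proofs are below) =====
def Claim_equal_construct_LIS_table : Prop :=
  ∀ (a : List Int), Dom_construct_LIS_table a → Pre_construct_LIS_table a →
    Spec_construct_LIS_table a (construct_LIS_table a)

-- ===== LEMMAS AND PROOFS =====

-- The common specification: the table entry at index i, defined by strong recursion.
def Tspec (a : List Int) (i : Nat) : List Int :=
  ((List.range i).attach.foldl
    (fun (cur : List Int) (j : {x // x ∈ List.range i}) =>
      if a.getD j.1 0 < a.getD i 0 ∧ ((Tspec a j.1).length : Int) > (cur.length : Int)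
      then Tspec a j.1 else cur) []) ++ [a.getD i 0]
termination_by i
decreasing_by exact List.mem_range.mp j.2

-- length and earliest-best-predecessor, defined by strong recursion (mirrors B's DP).
def Tlp (a : List Int) (i : Nat) : Int × Int :=
  (List.range i).attach.foldl
    (fun (st : Int × Int) (j : {x // x ∈ List.range i}) =>
      if a.getD j.1 0 < a.getD i 0 ∧ (Tlp a j.1).1 + 1 > st.1
      then ((Tlp a j.1).1 + 1, (j.1 : Int)) else st) (1, -1)
termination_by i
decreasing_by exact List.mem_range.mp j.2

def FA (a : List Int) (i : Nat) (cur : List Int) (j : Nat) : List Int :=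
  if a.getD j 0 < a.getD i 0 ∧ ((Tspec a j).length : Int) > (cur.length : Int)
  then Tspec a j else cur

def FB (a : List Int) (i : Nat) (st : Int × Int) (j : Nat) : Int × Int :=
  if a.getD j 0 < a.getD i 0 ∧ (Tlp a j).1 + 1 > st.1
  then ((Tlp a j).1 + 1, (j : Int)) else st

lemma Tspec_eq (a : List Int) (i : Nat) :
    Tspec a i = (List.range i).foldl (FA a i) [] ++ [a.getD i 0] := by
  rw [Tspec]
  exact congrArg (fun x => x ++ [a.getD i 0])
    (List.foldl_attach (l := List.range i) (f := FA a i) (b := ([] : List Int)))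

lemma Tlp_eq (a : List Int) (i : Nat) :
    Tlp a i = (List.range i).foldl (FB a i) (1, -1) := by
  rw [Tlp]
  exact List.foldl_attach (l := List.range i) (f := FB a i) (b := ((1 : Int), (-1 : Int)))

def InvLP (a : List Int) (i : Nat) (c : List Int) (st : Int × Int) : Prop :=
  st.1 = (c.length : Int) + 1 ∧
  c = (if st.2 = -1 then [] else Tspec a st.2.toNat) ∧
  (st.2 = -1 ∨ (0 ≤ st.2 ∧ st.2.toNat < i))

lemma pairFold (a : List Int) (i : Nat)
    (hlen : ∀ j, j < i → (Tlp a j).1 = ((Tspec a j).length : Int)) :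
    ∀ (l : List Nat), (∀ j ∈ l, j < i) → ∀ c st, InvLP a i c st →
      InvLP a i (l.foldl (FA a i) c) (l.foldl (FB a i) st) := by
  intro l
  induction l with
  | nil => intro _ c st h; exact h
  | cons x xs ih =>
    intro hl c st h
    have hx : x < i := hl x (List.mem_cons_self)
    obtain ⟨h1, h2, h3⟩ := h
    simp only [List.foldl_cons]
    refine ih (fun j hj => hl j (List.mem_cons_of_mem _ hj)) _ _ ?_
    have hcc : (a.getD x 0 < a.getD i 0 ∧ (Tlp a x).1 + 1 > st.1) ↔
        (a.getD x 0 < a.getD i 0 ∧ ((Tspec a x).length : Int) > (c.length : Int)) := by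
      rw [hlen x hx, h1]
      exact ⟨fun ⟨u, v⟩ => ⟨u, by omega⟩, fun ⟨u, v⟩ => ⟨u, by omega⟩⟩
    by_cases hc : a.getD x 0 < a.getD i 0 ∧ ((Tspec a x).length : Int) > (c.length : Int)
    · rw [FA, FB, if_pos hc, if_pos (hcc.mpr hc)]
      refine ⟨by rw [hlen x hx], ?_, Or.inr ⟨Int.natCast_nonneg x, by simp [hx]⟩⟩
      simp [show ((x : Int)) ≠ -1 by omega]
    · rw [FA, FB, if_neg hc, if_neg (fun hh => hc (hcc.mp hh))]
      exact ⟨h1, h2, h3⟩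

lemma lp_spec (a : List Int) (i : Nat) :
    (Tlp a i).1 = ((Tspec a i).length : Int) ∧
    Tspec a i = (if (Tlp a i).2 = -1 then [] else Tspec a (Tlp a i).2.toNat) ++ [a.getD i 0] ∧
    ((Tlp a i).2 = -1 ∨ (0 ≤ (Tlp a i).2 ∧ (Tlp a i).2.toNat < i)) := by
  induction i using Nat.strong_induction_on with
  | _ i IH =>
    have hlen : ∀ j, j < i → (Tlp a j).1 = ((Tspec a j).length : Int) :=
      fun j hj => (IH j hj).1
    have h := pairFold a i hlen (List.range i) (fun j hj => List.mem_range.mp hj)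
      [] (1, -1) ⟨by simp, by simp, Or.inl rfl⟩
    rw [← Tlp_eq] at h
    obtain ⟨h1, h2, h3⟩ := h
    refine ⟨?_, ?_, h3⟩
    · rw [Tspec_eq, h1]
      simp
    · rw [Tspec_eq, h2]

-- ---- generic getD/set helpers ----
lemma getD_set_self {α : Type} (l : List α) (i : Nat) (v d : α) (h : i < l.length) :
    (l.set i v).getD i d = v := by
  simp [List.getD_eq_getElem?_getD, h]

lemma getD_set_ne {α : Type} (l : List α) (i j : Nat) (v d : α) (h : i ≠ j) :
    (l.set i v).getD j d = l.getD j d := by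
  simp [List.getD_eq_getElem?_getD, h]

-- ---- port A characterisation ----
def TblA (a : List Int) (m : Nat) : List (List Int) :=
  (List.range a.length).map (fun k => if k < m then Tspec a k else [])

def ABody (a : List Int) (L : List (List Int)) (i : Int) : List (List Int) :=
  let L := (PySem.List.pyRange 0 i 1).foldl (fun L j =>
    if PySem.List.pyGetD a j 0 < PySem.List.pyGetD a i 0 ∧
       PySem.List.len (PySem.List.pyGetD L j ([] : List Int)) >
         PySem.List.len (PySem.List.pyGetD L i ([] : List Int))
    then PySem.List.pySetD L i (PySem.List.pyGetD L j ([] : List Int))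
    else L) L
  PySem.List.pySetD L i (PySem.List.pyGetD L i ([] : List Int) ++ [PySem.List.pyGetD a i 0])

lemma portA_eq (a : List Int) :
    construct_LIS_table a =
      (PySem.List.pyRange 1 (a.length : Int) 1).foldl (ABody a)
        (PySem.List.pySetD ((PySem.List.pyRange 0 (a.length : Int) 1).map
          (fun _ => ([] : List Int))) 0 [PySem.List.pyGetD a 0 0]) := rfl

lemma TblA_getD (a : List Int) (m k : Nat) (hk : k < a.length) :
    (TblA a m).getD k [] = if k < m then Tspec a k else [] := by
  simp [TblA, List.getD_eq_getElem?_getD, hk]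

lemma TblA_length (a : List Int) (m : Nat) : (TblA a m).length = a.length := by
  simp [TblA]

lemma innerA (a : List Int) (m : Nat) (hm : m < a.length) :
    ∀ (l : List Nat), (∀ j ∈ l, j < m) → ∀ cur,
      l.foldl (fun L j =>
        if a.getD j 0 < a.getD m 0 ∧
           ((L.getD j []).length : Int) > ((L.getD m []).length : Int)
        then L.set m (L.getD j []) else L) ((TblA a m).set m cur)
      = (TblA a m).set m (l.foldl (FA a m) cur) := by
  intro l
  induction l with
  | nil => intro _ cur; rfl
  | cons x xs ih =>
    intro hl cur
    have hx : x < m := hl x (List.mem_cons_self)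
    have e1 : ((TblA a m).set m cur).getD x [] = Tspec a x := by
      rw [getD_set_ne _ _ _ _ _ (Nat.ne_of_gt hx), TblA_getD a m x (Nat.lt_trans hx hm)]
      simp [hx]
    have e2 : ((TblA a m).set m cur).getD m [] = cur :=
      getD_set_self _ _ _ _ (by rw [TblA_length]; exact hm)
    simp only [List.foldl_cons, e1, e2]
    by_cases hc : a.getD x 0 < a.getD m 0 ∧ ((Tspec a x).length : Int) > (cur.length : Int)
    · rw [if_pos hc, List.set_set, ih (fun j hj => hl j (List.mem_cons_of_mem _ hj))]
      rw [show FA a m cur x = Tspec a x by rw [FA, if_pos hc]]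
    · rw [if_neg hc, ih (fun j hj => hl j (List.mem_cons_of_mem _ hj))]
      rw [show FA a m cur x = cur by rw [FA, if_neg hc]]

lemma TblA_set (a : List Int) (m : Nat) (_hm : m < a.length) :
    (TblA a m).set m (Tspec a m) = TblA a (m + 1) := by
  apply List.ext_getElem (by simp [TblA])
  intro n h1 h2
  simp only [TblA, List.length_set, List.length_map, List.length_range] at h1 h2 ⊢
  rw [List.getElem_set]
  simp only [List.getElem_map, List.getElem_range]
  split_ifs <;> first | rfl | omega | (subst_eqs; simp_all)

lemma TblA_set_nil (a : List Int) (m : Nat) :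
    (TblA a m).set m ([] : List Int) = TblA a m := by
  apply List.ext_getElem (by simp)
  intro n h1 h2
  rw [List.getElem_set]
  simp only [TblA, List.getElem_map, List.getElem_range]
  split_ifs <;> first | rfl | omega

lemma ABody_step (a : List Int) (m : Nat) (hm : m < a.length) :
    ABody a (TblA a m) (m : Int) = TblA a (m + 1) := by
  unfold ABody
  rw [PySem.List.pyRange_zero_natCast m, List.foldl_map]
  simp only [PySem.List.pyGetD_natCast, PySem.List.pySetD_natCast, PySem.List.len_eq]
  have h := innerA a m hm (List.range m) (fun j hj => List.mem_range.mp hj) []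
  rw [TblA_set_nil] at h
  rw [h, getD_set_self _ _ _ _ (by rw [TblA_length]; exact hm), List.set_set,
    ← Tspec_eq, TblA_set a m hm]

lemma outerA (a : List Int) (_h : a ≠ []) :
    ∀ m, 1 ≤ m → m ≤ a.length →
      (PySem.List.pyRange 1 (m : Int) 1).foldl (ABody a) (TblA a 1) = TblA a m := by
  intro m
  induction m with
  | zero => intro h1 _; omega
  | succ m ih =>
    intro _ h2
    rcases Nat.eq_zero_or_pos m with hm0 | hm1
    · subst hm0
      rw [show ((1 : Nat) : Int) = 1 by norm_num, PySem.List.pyRange_one_eq_nil le_rfl]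
      rfl
    · have hmn : m < a.length := by omega
      rw [show (((m + 1 : Nat)) : Int) = (m : Int) + 1 by push_cast; ring,
        PySem.List.pyRange_one_succ_right (by exact_mod_cast hm1), List.foldl_append]
      rw [ih hm1 (by omega)]
      exact ABody_step a m hmn

lemma init_eq (a : List Int) (h : a ≠ []) :
    PySem.List.pySetD ((PySem.List.pyRange 0 (a.length : Int) 1).map
      (fun _ => ([] : List Int))) 0 [PySem.List.pyGetD a 0 0] = TblA a 1 := by
  have hn : 0 < a.length := List.length_pos_iff.mpr h
  rw [PySem.List.pyRange_zero_natCast, PySem.List.pyGetD_zero]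
  rw [show (0 : Int) = ((0 : Nat) : Int) by norm_num, PySem.List.pySetD_natCast]
  apply List.ext_getElem (by simp [TblA])
  intro n h1 h2
  rw [List.getElem_set]
  simp only [TblA, List.getElem_map, List.getElem_range]
  split_ifs with hh1 hh2
  all_goals first
    | (subst hh1; rw [Tspec_eq]; simp)
    | omega
    | simp

lemma portA_final (a : List Int) (h : a ≠ []) :
    construct_LIS_table a = (List.range a.length).map (Tspec a) := by
  have hn : 0 < a.length := List.length_pos_iff.mpr h
  rw [portA_eq, init_eq a h, outerA a h a.length hn le_rfl]
  exact List.map_congr_left (fun k hk => by simp [List.mem_range.mp hk])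

-- ---- port B characterisation ----
def LPTbl (a : List Int) (m : Nat) : List Int × List Int :=
  ((List.range a.length).map (fun k => if k < m then (Tlp a k).1 else 1),
   (List.range a.length).map (fun k => if k < m then (Tlp a k).2 else -1))

def BBody (a : List Int) (st : List Int × List Int) (i : Int) : List Int × List Int :=
  (PySem.List.pyRange 0 i 1).foldl (fun (st : List Int × List Int) j =>
    if PySem.List.pyGetD a j 0 < PySem.List.pyGetD a i 0 ∧
       PySem.List.pyGetD st.1 j 0 + 1 > PySem.List.pyGetD st.1 i 0
    then (PySem.List.pySetD st.1 i (PySem.List.pyGetD st.1 j 0 + 1),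
          PySem.List.pySetD st.2 i j)
    else st) st

lemma portB_eq (a : List Int) :
    construct_LIS_table_alt a =
      (PySem.List.pyRange 0 (a.length : Int) 1).foldl (fun res i =>
        res ++ [(reconGo a ((PySem.List.pyRange 1 (a.length : Int) 1).foldl (BBody a)
          (List.replicate a.length (1 : Int), List.replicate a.length (-1 : Int))).2
          (a.length + 1) i []).reverse]) [] := rfl

lemma LP1_getD (a : List Int) (m k : Nat) (d : Int) (hk : k < a.length) :
    (LPTbl a m).1.getD k d = if k < m then (Tlp a k).1 else 1 := by
  simp [LPTbl, List.getD_eq_getElem?_getD, hk]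

lemma LP2_getD (a : List Int) (m k : Nat) (d : Int) (hk : k < a.length) :
    (LPTbl a m).2.getD k d = if k < m then (Tlp a k).2 else -1 := by
  simp [LPTbl, List.getD_eq_getElem?_getD, hk]

lemma LP1_length (a : List Int) (m : Nat) : (LPTbl a m).1.length = a.length := by
  simp [LPTbl]

lemma LP1_set_id (a : List Int) (m : Nat) : (LPTbl a m).1.set m 1 = (LPTbl a m).1 := by
  apply List.ext_getElem (by simp)
  intro n h1 h2
  rw [List.getElem_set]
  simp only [LPTbl, List.getElem_map, List.getElem_range]
  split_ifs <;> first | rfl | omega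

lemma LP2_set_id (a : List Int) (m : Nat) : (LPTbl a m).2.set m (-1) = (LPTbl a m).2 := by
  apply List.ext_getElem (by simp)
  intro n h1 h2
  rw [List.getElem_set]
  simp only [LPTbl, List.getElem_map, List.getElem_range]
  split_ifs <;> first | rfl | omega

lemma LP_set (a : List Int) (m : Nat) (_hm : m < a.length) :
    ((LPTbl a m).1.set m (Tlp a m).1, (LPTbl a m).2.set m (Tlp a m).2) = LPTbl a (m + 1) := by
  have e1 : (LPTbl a m).1.set m (Tlp a m).1 = (LPTbl a (m + 1)).1 := by
    apply List.ext_getElem (by simp [LPTbl])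
    intro n h1 h2
    rw [List.getElem_set]
    simp only [LPTbl, List.getElem_map, List.getElem_range]
    split_ifs <;> first | rfl | omega | (subst_eqs; simp_all)
  have e2 : (LPTbl a m).2.set m (Tlp a m).2 = (LPTbl a (m + 1)).2 := by
    apply List.ext_getElem (by simp [LPTbl])
    intro n h1 h2
    rw [List.getElem_set]
    simp only [LPTbl, List.getElem_map, List.getElem_range]
    split_ifs <;> first | rfl | omega | (subst_eqs; simp_all)
  rw [e1, e2]

lemma innerB (a : List Int) (m : Nat) (hm : m < a.length) :
    ∀ (l : List Nat), (∀ j ∈ l, j < m) → ∀ (lp : Int × Int),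
      l.foldl (fun (st : List Int × List Int) j =>
        if a.getD j 0 < a.getD m 0 ∧ st.1.getD j 0 + 1 > st.1.getD m 0
        then (st.1.set m (st.1.getD j 0 + 1), st.2.set m (j : Int))
        else st) ((LPTbl a m).1.set m lp.1, (LPTbl a m).2.set m lp.2)
      = ((LPTbl a m).1.set m (l.foldl (FB a m) lp).1,
         (LPTbl a m).2.set m (l.foldl (FB a m) lp).2) := by
  intro l
  induction l with
  | nil => intro _ lp; rfl
  | cons x xs ih =>
    intro hl lp
    have hx : x < m := hl x (List.mem_cons_self)
    have e1 : ((LPTbl a m).1.set m lp.1).getD x 0 = (Tlp a x).1 := by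
      rw [getD_set_ne _ _ _ _ _ (Nat.ne_of_gt hx), LP1_getD a m x 0 (Nat.lt_trans hx hm)]
      simp [hx]
    have e2 : ((LPTbl a m).1.set m lp.1).getD m 0 = lp.1 :=
      getD_set_self _ _ _ _ (by rw [LP1_length]; exact hm)
    simp only [List.foldl_cons, e1, e2]
    by_cases hc : a.getD x 0 < a.getD m 0 ∧ (Tlp a x).1 + 1 > lp.1
    · rw [if_pos hc]
      simp only [List.set_set]
      rw [show FB a m lp x = ((Tlp a x).1 + 1, (x : Int)) by rw [FB, if_pos hc]]
      exact ih (fun j hj => hl j (List.mem_cons_of_mem _ hj)) ((Tlp a x).1 + 1, (x : Int))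
    · rw [if_neg hc]
      rw [show FB a m lp x = lp by rw [FB, if_neg hc]]
      exact ih (fun j hj => hl j (List.mem_cons_of_mem _ hj)) lp

lemma BBody_step (a : List Int) (m : Nat) (hm : m < a.length) :
    BBody a (LPTbl a m) (m : Int) = LPTbl a (m + 1) := by
  unfold BBody
  rw [PySem.List.pyRange_zero_natCast m, List.foldl_map]
  simp only [PySem.List.pyGetD_natCast, PySem.List.pySetD_natCast]
  have h := innerB a m hm (List.range m) (fun j hj => List.mem_range.mp hj)
    ((1 : Int), (-1 : Int))
  rw [LP1_set_id, LP2_set_id] at h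
  exact h.trans (by rw [← Tlp_eq]; exact LP_set a m hm)

lemma initB_eq (a : List Int) :
    (List.replicate a.length (1 : Int), List.replicate a.length (-1 : Int)) = LPTbl a 1 := by
  have e0 : Tlp a 0 = (1, -1) := by rw [Tlp_eq]; rfl
  have e1 : List.replicate a.length (1 : Int) = (LPTbl a 1).1 := by
    apply List.ext_getElem (by simp [LPTbl])
    intro n h1 h2
    simp only [List.getElem_replicate, LPTbl, List.getElem_map, List.getElem_range]
    split_ifs with hh
    · interval_cases n
      rw [e0]
    · rfl
  have e2 : List.replicate a.length (-1 : Int) = (LPTbl a 1).2 := by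
    apply List.ext_getElem (by simp [LPTbl])
    intro n h1 h2
    simp only [List.getElem_replicate, LPTbl, List.getElem_map, List.getElem_range]
    split_ifs with hh
    · interval_cases n
      rw [e0]
    · rfl
  rw [e1, e2]

lemma outerB (a : List Int) (_h : a ≠ []) :
    ∀ m, 1 ≤ m → m ≤ a.length →
      (PySem.List.pyRange 1 (m : Int) 1).foldl (BBody a)
        (List.replicate a.length (1 : Int), List.replicate a.length (-1 : Int))
      = LPTbl a m := by
  intro m
  induction m with
  | zero => intro h1 _; omega
  | succ m ih =>
    intro _ h2
    rcases Nat.eq_zero_or_pos m with hm0 | hm1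
    · subst hm0
      rw [show ((1 : Nat) : Int) = 1 by norm_num, PySem.List.pyRange_one_eq_nil le_rfl]
      exact initB_eq a
    · have hmn : m < a.length := by omega
      rw [show (((m + 1 : Nat)) : Int) = (m : Int) + 1 by push_cast; ring,
        PySem.List.pyRange_one_succ_right (by exact_mod_cast hm1), List.foldl_append]
      rw [ih hm1 (by omega)]
      exact BBody_step a m hmn

lemma reconGo_spec (a : List Int) :
    ∀ i, i < a.length → ∀ fuel, i + 2 ≤ fuel → ∀ seq,
      reconGo a (LPTbl a a.length).2 fuel (i : Int) seq = seq ++ (Tspec a i).reverse := by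
  intro i
  induction i using Nat.strong_induction_on with
  | _ i IH =>
    intro hi fuel hfuel seq
    cases fuel with
    | zero => omega
    | succ f =>
      simp only [reconGo]
      rw [if_neg (by omega)]
      rw [show PySem.List.pyGetD (LPTbl a a.length).2 (i : Int) 0 = (Tlp a i).2 by
        rw [PySem.List.pyGetD_natCast, LP2_getD a a.length i 0 hi]; simp [hi]]
      rw [show PySem.List.pyGetD a (i : Int) 0 = a.getD i 0 from PySem.List.pyGetD_natCast a i 0]
      have lp := lp_spec a i
      rcases lp.2.2 with hp | ⟨hp0, hpi⟩
      · rw [hp]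
        cases f with
        | zero => omega
        | succ f' =>
          simp only [reconGo, if_true]
          rw [show Tspec a i = [a.getD i 0] by rw [lp.2.1, hp]; simp]
          simp
      · rw [show (Tlp a i).2 = (((Tlp a i).2.toNat : Nat) : Int) from (Int.toNat_of_nonneg hp0).symm]
        rw [IH (Tlp a i).2.toNat hpi (Nat.lt_trans hpi hi) f (by omega) (seq ++ [a.getD i 0])]
        rw [show Tspec a i = Tspec a (Tlp a i).2.toNat ++ [a.getD i 0] by
          rw [lp.2.1, if_neg (by omega)]]
        simp

lemma portB_final (a : List Int) (h : a ≠ []) :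
    construct_LIS_table_alt a = (List.range a.length).map (Tspec a) := by
  have hn : 0 < a.length := List.length_pos_iff.mpr h
  rw [portB_eq, outerB a h a.length hn le_rfl, PySem.List.pyRange_zero_natCast,
    List.foldl_map, PySem.List.foldl_append_singleton_eq_map]
  simp only [List.nil_append]
  apply List.map_congr_left
  intro k hk
  rw [reconGo_spec a k (List.mem_range.mp hk) (a.length + 1) (by have := List.mem_range.mp hk; omega) []]
  simp

-- ===== VERDICT (by name: the statement is the Claim_ definition above) =====
theorem construct_LIS_table_spec : Claim_equal_construct_LIS_table := by
  intro a _ hpre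
  unfold Spec_construct_LIS_table
  rw [portA_final a hpre, portB_final a hpre]
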